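-- pv_equiv track=rewrite | github.com/UlysseCorbeil/project_euler | 34.py | dig_curious_facts
-- ===== SOURCE A (Python) =====
-- memo = {}
--
-- def fac(n):
--     if n == 1 or n == 0:
--         return 1
--     if n >= 2:
--         memo[n] = n * fac(n - 1)
--         return memo[n]
--
-- def dig_curious_facts(n):
--     split = [int(k) for k in str(n)]
--     sum = 0
--     sub_sum = 0
--
--     for k in split:
--         sub_sum += fac(k)
--         if sub_sum == n:
--             sum += sub_sum
--
--     return sum
-- ===== SOURCE B (Python) =====
-- def _fact(d):
--     f = 1
--     for i in range(1, d + 1):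
--         f *= i
--     return f
--
--
-- def dig_curious_facts(n):
--     # Build the list of prefix sums of digit factorials, then a single
--     # membership test: prefix sums strictly increase, so at most one equals n.
--     prefix = []
--     total = 0
--     for c in str(n):
--         total += _fact(int(c))
--         prefix.append(total)
--     return n if n in prefix else 0
-- ===== Notes on version B (the rewrite author's own statement) =====
-- stated objective: simpler
-- what changed: B replaces the recursive globally-memoized factorial by a small iterative product, and replaces A's fused accumulate-compare-and-add loop (which adds every matching partial sum) by building the prefix-sum list once and doing a single membership test; prefix sums strictly increase, so the two agree.
import Mathlib
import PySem

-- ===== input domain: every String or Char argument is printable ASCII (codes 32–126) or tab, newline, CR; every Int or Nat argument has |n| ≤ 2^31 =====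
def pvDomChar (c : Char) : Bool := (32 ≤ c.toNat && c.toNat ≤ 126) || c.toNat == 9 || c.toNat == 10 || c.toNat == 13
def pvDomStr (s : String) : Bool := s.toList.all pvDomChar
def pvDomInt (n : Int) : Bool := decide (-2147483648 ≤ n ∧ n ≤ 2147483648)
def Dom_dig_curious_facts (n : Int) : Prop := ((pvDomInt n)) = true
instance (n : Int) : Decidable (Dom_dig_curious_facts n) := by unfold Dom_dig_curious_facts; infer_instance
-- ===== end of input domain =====

-- B: iterative factorial + prefix-sum list with a single membership test,
-- instead of A's recursive memoized factorial fused with an accumulate-compare loop (simpler decomposition, same cost).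


-- ===== PORT A =====
-- fac(n): only ever called on digit values 0..9 (nonnegative), so the obvious
-- structural recursion on Nat is the faithful port; the global memo does not affect the return value.
def pvFacA : Nat → Int
  | 0 => 1
  | 1 => 1
  | (m + 2) => ((m : Int) + 2) * pvFacA (m + 1)

def dig_curious_facts (n : Int) : Int :=
  -- int(k) for a one-char string: PySem.Int.ofChars? [c]; none (ValueError, e.g. '-') is excluded by Pre_ (0 ≤ n)
  let split := (PySem.Int.toStr n).toList.map (fun c => (PySem.Int.ofChars? [c]).getD 0)
  (split.foldl (fun (st : Int × Int) k =>
      let sub := st.2 + pvFacA k.toNat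
      ((if sub = n then st.1 + sub else st.1), sub)) (0, 0)).1

-- ===== PORT B =====
def pvFactIter (d : Int) : Int :=
  (PySem.List.pyRange 1 (d + 1) 1).foldl (fun f i => f * i) 1

def dig_curious_facts_alt (n : Int) : Int :=
  let st := (PySem.Int.toStr n).toList.foldl (fun (st : Int × List Int) c =>
      let t := st.1 + pvFactIter ((PySem.Int.ofChars? [c]).getD 0)
      (t, st.2 ++ [t])) ((0 : Int), ([] : List Int))
  if n ∈ st.2 then n else 0

-- ===== PRECONDITION & SPEC =====
-- Pre_ excludes exactly the inputs where Python A raises: for n < 0, str(n) starts with '-' and int('-') raises ValueError.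
def Pre_dig_curious_facts (n : Int) : Prop := 0 ≤ n
instance (n : Int) : Decidable (Pre_dig_curious_facts n) := by unfold Pre_dig_curious_facts; infer_instance
def pvWitness_dig_curious_facts : Int := (145)

def Spec_dig_curious_facts (n : Int) (out : Int) : Prop := out = dig_curious_facts_alt n
instance (n : Int) (out : Int) : Decidable (Spec_dig_curious_facts n out) := by unfold Spec_dig_curious_facts; infer_instance

-- ===== CLAIM (what is proved, stated in full; the proofs are below) =====
def Claim_equal_dig_curious_facts : Prop := ∀ (n : Int), Dom_dig_curious_facts n → Pre_dig_curious_facts n → Spec_dig_curious_facts n (dig_curious_facts n)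

-- ===== LEMMAS AND PROOFS =====

-- prefix sums of the digit factorials (spec-level helper for the proofs)
def pvPfx (t : Int) : List Int → List Int
  | [] => []
  | f :: fs => (t + f) :: pvPfx (t + f) fs

theorem pvFacA_pos : ∀ m : Nat, 0 < pvFacA m := by
  intro m
  induction m using pvFacA.induct with
  | case1 => simp [pvFacA]
  | case2 => simp [pvFacA]
  | case3 m ih => unfold pvFacA; positivity

theorem pyRange_one_nil {a b : Int} (h : b ≤ a) : PySem.List.pyRange a b 1 = [] := by
  simp [PySem.List.pyRange]
  omega

theorem pvFacA_succ (m : Nat) : pvFacA (m + 1) = pvFacA m * ((m : Int) + 1) := by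
  cases m with
  | zero => simp [pvFacA]
  | succ k => show pvFacA (k + 2) = _ ; rw [pvFacA] ; push_cast ; ring

theorem pvFactIter_nat : ∀ m : Nat, pvFactIter (m : Int) = pvFacA m := by
  intro m
  induction m with
  | zero => simp [pvFactIter, pvFacA]
  | succ k ih =>
      unfold pvFactIter
      rw [show ((k + 1 : Nat) : Int) + 1 = ((k : Int) + 1) + 1 by push_cast; ring,
          PySem.List.pyRange_one_succ_right (by omega), List.foldl_append]
      simp only [List.foldl]
      rw [show List.foldl (fun f i : Int => f * i) 1 (PySem.List.pyRange 1 ((k : Int) + 1) 1) = pvFacA k from ih, pvFacA_succ]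

theorem pvFactIter_eq (d : Int) : pvFactIter d = pvFacA d.toNat := by
  by_cases h : 0 ≤ d
  · have : d = (d.toNat : Int) := by omega
    rw [this, pvFactIter_nat]; congr 1
  · have h0 : d.toNat = 0 := by omega
    rw [h0]
    unfold pvFactIter
    rw [pyRange_one_nil (by omega)]
    simp [pvFacA]

-- B's loop builds exactly the prefix sums of the per-element values
theorem pvB_fold {α : Type} (v : α → Int) : ∀ (l : List α) (t : Int) (acc : List Int),
    (l.foldl (fun (st : Int × List Int) a => (st.1 + v a, st.2 ++ [st.1 + v a])) (t, acc)).2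
      = acc ++ pvPfx t (l.map v) := by
  intro l
  induction l with
  | nil => simp [pvPfx]
  | cons a l ih => intro t acc; simp [pvPfx, ih]

-- once the running sum has reached n, no later partial sum can equal n (the values are positive)
theorem pvA_fold_high {α : Type} (n : Int) (v : α → Int) (hv : ∀ a, 0 < v a) :
    ∀ (l : List α) (s t : Int), n ≤ t →
      (l.foldl (fun (st : Int × Int) a =>
        ((if st.2 + v a = n then st.1 + (st.2 + v a) else st.1), st.2 + v a)) (s, t)).1 = s := by
  intro l
  induction l with
  | nil => intro s t _; rfl
  | cons a l ih =>
      intro s t ht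
      have hva := hv a
      have hne : t + v a ≠ n := by omega
      simp only [List.foldl, if_neg hne]
      exact ih s (t + v a) (by omega)

-- A's accumulated sum is n when n occurs among the prefix sums, else 0
theorem pvA_fold {α : Type} (n : Int) (v : α → Int) (hv : ∀ a, 0 < v a) :
    ∀ (l : List α) (s t : Int),
      (l.foldl (fun (st : Int × Int) a =>
        ((if st.2 + v a = n then st.1 + (st.2 + v a) else st.1), st.2 + v a)) (s, t)).1
        = s + (if n ∈ pvPfx t (l.map v) then n else 0) := by
  intro l
  induction l with
  | nil => intro s t; simp [pvPfx]
  | cons a l ih =>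
      intro s t
      by_cases h : t + v a = n
      · simp only [List.foldl, if_pos h]
        rw [pvA_fold_high n v hv l (s + (t + v a)) (t + v a) (by omega)]
        simp [pvPfx, List.map, h]
      · simp only [List.foldl, if_neg h]
        rw [ih s (t + v a)]
        have hne : n ≠ t + v a := fun he => h he.symm
        simp [pvPfx, List.mem_cons, hne]

-- ===== VERDICT (by name: the statement is the Claim_ definition above) =====
theorem dig_curious_facts_spec : Claim_equal_dig_curious_facts := by
  unfold Claim_equal_dig_curious_facts
  intro n _ _
  unfold Spec_dig_curious_facts dig_curious_facts dig_curious_facts_alt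
  simp only [List.foldl_map, pvFactIter_eq]
  rw [pvA_fold n (fun c => pvFacA ((PySem.Int.ofChars? [c]).getD 0).toNat)
        (fun a => pvFacA_pos _) ((PySem.Int.toStr n).toList) 0 0,
      pvB_fold (fun c => pvFacA ((PySem.Int.ofChars? [c]).getD 0).toNat)
        ((PySem.Int.toStr n).toList) 0 []]
  simp
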